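-- pv_equiv track=rewrite | github.com/Kracocks/advent_of_code_2024 | day2/part2.py | is_list_good2
-- ===== SOURCE A (Python) =====
-- def is_good(line, prec_num, actual_num):
--     if line:
--         if ((prec_num + 1) == actual_num):
--             return True
--         elif ((prec_num + 2) == actual_num):
--             return True
--         elif ((prec_num + 3) == actual_num):
--             return True
--     elif not line:
--         if ((prec_num - 1) == actual_num):
--             return True
--         elif ((prec_num - 2) == actual_num):
--             return True
--         elif ((prec_num - 3) == actual_num):
--             return True
--     return False
--
-- def is_list_good(l)->bool:
--     for i in range(1, len(l)):
--         actual_num = int(l[i])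
--         precedent_num = int(l[i-1])
--
--         if i == 1:
--             if actual_num > precedent_num:
--                 line_increasing = True
--             else:
--                 line_increasing = False
--
--         safe = is_good(line_increasing, precedent_num, actual_num)
--
--         if not safe:
--             return False
--     return True
--
-- def is_list_good2(l):
--     if is_list_good(l):
--         return True
--
--     for i in range(len(l)):
--         modified_list = l[:i] + l[i+1:]
--         if is_list_good(modified_list):
--             return True
--     return False
-- ===== SOURCE B (Python) =====
-- def _good_step(inc, prec, actual):
--     d = actual - prec
--     return (1 <= d <= 3) if inc else (-3 <= d <= -1)
--
-- def _first_bad(inc, l):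
--     # index of the first adjacent pair violating the direction rule, else None
--     for i in range(1, len(l)):
--         if not _good_step(inc, l[i - 1], l[i]):
--             return i
--     return None
--
-- def _safe(l):
--     return len(l) < 2 or _first_bad(l[1] > l[0], l) is None
--
-- def is_list_good2(l):
--     if len(l) < 2:
--         return True
--     i = _first_bad(l[1] > l[0], l)
--     if i is None:
--         return True
--     # only removing one of these four indices can possibly fix the report
--     return any(_safe(l[:j] + l[j + 1:]) for j in (0, 1, i - 1, i))
-- ===== Notes on version B (the rewrite author's own statement) =====
-- stated objective: faster
-- what changed: Instead of retrying removal of every index (n linear re-checks over n copies), B locates the first violating adjacent pair in one linear pass and re-checks only the four candidate indices (0, 1, i-1, i) whose removal can possibly fix the report.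
import Mathlib
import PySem

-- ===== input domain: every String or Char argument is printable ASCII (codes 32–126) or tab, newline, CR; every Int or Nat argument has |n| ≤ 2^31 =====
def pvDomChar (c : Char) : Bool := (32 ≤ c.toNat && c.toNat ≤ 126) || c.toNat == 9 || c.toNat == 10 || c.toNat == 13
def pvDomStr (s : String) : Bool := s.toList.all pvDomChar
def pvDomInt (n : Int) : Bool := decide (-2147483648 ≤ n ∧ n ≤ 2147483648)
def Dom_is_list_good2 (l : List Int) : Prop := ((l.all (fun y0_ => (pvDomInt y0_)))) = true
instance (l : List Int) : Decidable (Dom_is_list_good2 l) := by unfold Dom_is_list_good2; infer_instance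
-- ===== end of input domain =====

-- B replaces A's try-deleting-every-index scan by one linear pass that finds the
-- first violating pair and retries only the four indices whose removal can matter.

-- ===== PORT A =====
def is_good (line : Bool) (prec_num actual_num : Int) : Bool :=
  if line then
    if prec_num + 1 = actual_num then true
    else if prec_num + 2 = actual_num then true
    else if prec_num + 3 = actual_num then true
    else false
  else
    if prec_num - 1 = actual_num then true
    else if prec_num - 2 = actual_num then true
    else if prec_num - 3 = actual_num then true
    else false

-- loop 'for i in range(1, len(l))' of is_list_good; indices i and i-1 are in range, so l[i] = l.getD i 0
def isListGoodAux (l : List Int) (line_increasing : Bool) (i : Nat) : Bool :=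
  if _h : i < l.length then
    let actual_num := l.getD i 0
    let precedent_num := l.getD (i - 1) 0
    let line_increasing := if i = 1 then decide (actual_num > precedent_num) else line_increasing
    if is_good line_increasing precedent_num actual_num then isListGoodAux l line_increasing (i + 1)
    else false
  else true
termination_by l.length - i

def is_list_good (l : List Int) : Bool := isListGoodAux l false 1

-- loop 'for i in range(len(l))' of is_list_good2; l[:i] + l[i+1:] ported with PySem slices
def good2Aux (l : List Int) (i : Nat) : Bool :=
  if _h : i < l.length then
    let modified_list := PySem.List.slice l none (some (i : Int)) ++ PySem.List.slice l (some ((i : Int) + 1)) none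
    if is_list_good modified_list then true else good2Aux l (i + 1)
  else false
termination_by l.length - i

def is_list_good2 (l : List Int) : Bool :=
  if is_list_good l then true else good2Aux l 0

-- ===== PORT B =====
def good_step (inc : Bool) (prec actual : Int) : Bool :=
  let d := actual - prec
  if inc then decide (1 ≤ d ∧ d ≤ 3) else decide (-3 ≤ d ∧ d ≤ -1)

-- _first_bad's loop; indices in range, so l[i] = l.getD i 0
def firstBadAux (inc : Bool) (l : List Int) (i : Nat) : Option Nat :=
  if _h : i < l.length then
    if good_step inc (l.getD (i - 1) 0) (l.getD i 0) then firstBadAux inc l (i + 1) else some i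
  else none
termination_by l.length - i

def safeB (l : List Int) : Bool :=
  decide (l.length < 2) || (firstBadAux (decide (l.getD 0 0 < l.getD 1 0)) l 1).isNone

def is_list_good2_alt (l : List Int) : Bool :=
  if l.length < 2 then true
  else
    match firstBadAux (decide (l.getD 0 0 < l.getD 1 0)) l 1 with
    | none => true
    | some i =>
      [0, 1, i - 1, i].any (fun j =>
        safeB (PySem.List.slice l none (some (j : Int)) ++ PySem.List.slice l (some ((j : Int) + 1)) none))

-- ===== PRECONDITION & SPEC =====
def Spec_is_list_good2 (l : List Int) (out : Bool) : Prop := out = is_list_good2_alt l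
instance (l : List Int) (out : Bool) : Decidable (Spec_is_list_good2 l out) := by unfold Spec_is_list_good2; infer_instance

-- ===== CLAIM (what is proved, stated in full; the proofs are below) =====
def Claim_equal_is_list_good2 : Prop := ∀ (l : List Int), Dom_is_list_good2 l → Spec_is_list_good2 l (is_list_good2 l)

-- ===== LEMMAS AND PROOFS =====

theorem step_eq (inc : Bool) (p a : Int) : is_good inc p a = good_step inc p a := by
  cases inc <;> simp only [is_good, good_step, Bool.if_true_left] <;>
    rw [Bool.eq_iff_iff] <;> simp <;> omega

theorem aux_eq (l : List Int) (inc : Bool) (i : Nat) (h2 : 2 ≤ i) :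
    isListGoodAux l inc i = (firstBadAux inc l i).isNone := by
  suffices H : ∀ n i, l.length - i ≤ n → 2 ≤ i →
      isListGoodAux l inc i = (firstBadAux inc l i).isNone from H l.length i (by omega) h2
  intro n
  induction n with
  | zero =>
    intro i hle _
    unfold isListGoodAux firstBadAux
    have h : ¬ i < l.length := by omega
    simp [h]
  | succ n ih =>
    intro i hle h2
    unfold isListGoodAux firstBadAux
    by_cases h : i < l.length
    · have hne : i ≠ 1 := by omega
      simp only [h, dif_pos, hne, if_false, step_eq]
      cases hgs : good_step inc (l.getD (i - 1) 0) (l.getD i 0) with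
      | false => simp
      | true => simp; exact ih (i + 1) (by omega) (by omega)
    · simp [h]

theorem good_eq_safeB (l : List Int) : is_list_good l = safeB l := by
  by_cases h : l.length < 2
  · have h1 : ¬ 1 < l.length := by omega
    unfold is_list_good isListGoodAux safeB firstBadAux
    simp [h, h1]
  · have h1 : 1 < l.length := by omega
    rw [is_list_good, safeB, isListGoodAux.eq_def, firstBadAux.eq_def, dif_pos h1, dif_pos h1]
    simp only [h, decide_false, Bool.false_or, step_eq]
    rw [aux_eq l _ 2 (by omega)]
    have e0 : (1 : Nat) - 1 = 0 := rfl
    simp only [if_true, e0, gt_iff_lt]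
    cases hgs : good_step (decide (l.getD 0 0 < l.getD 1 0)) (l.getD 0 0) (l.getD 1 0) <;> simp

theorem slice_pair (l : List Int) (j : Nat) :
    PySem.List.slice l none (some (j : Int)) ++ PySem.List.slice l (some ((j : Int) + 1)) none
      = l.eraseIdx j := by
  have h : ((j : Int) + 1) = ((j + 1 : Nat) : Int) := by push_cast; ring
  rw [h, PySem.List.slice_to_natCast, PySem.List.slice_from_natCast]
  exact (List.eraseIdx_eq_take_drop_succ l j).symm

theorem firstBad_none_iff (inc : Bool) (l : List Int) (i0 : Nat) :
    firstBadAux inc l i0 = none ↔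
      ∀ k, i0 ≤ k → k < l.length → good_step inc (l.getD (k - 1) 0) (l.getD k 0) = true := by
  suffices H : ∀ n i0, l.length - i0 ≤ n → (firstBadAux inc l i0 = none ↔
      ∀ k, i0 ≤ k → k < l.length → good_step inc (l.getD (k - 1) 0) (l.getD k 0) = true) from
    H l.length i0 (by omega)
  intro n
  induction n with
  | zero =>
    intro i0 hle
    have h : ¬ i0 < l.length := by omega
    rw [firstBadAux.eq_def, dif_neg h]
    constructor
    · intro _ k hk1 hk2; omega
    · intro _; rfl
  | succ n ih =>
    intro i0 hle
    rw [firstBadAux.eq_def]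
    by_cases h : i0 < l.length
    · rw [dif_pos h]
      cases hgs : good_step inc (l.getD (i0 - 1) 0) (l.getD i0 0) with
      | false =>
        rw [if_neg (by simp)]
        constructor
        · intro hc; exact (Option.some_ne_none _ hc).elim
        · intro hall
          have hcon := hall i0 le_rfl h
          rw [hgs] at hcon
          exact absurd hcon (by simp)
      | true =>
        simp only [if_true]
        rw [ih (i0 + 1) (by omega)]
        constructor
        · intro hall k hk1 hk2
          rcases Nat.eq_or_lt_of_le hk1 with rfl | hlt
          · exact hgs
          · exact hall k hlt hk2
        · intro hall k hk1 hk2; exact hall k (by omega) hk2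
    · rw [dif_neg h]
      constructor
      · intro _ k hk1 hk2; omega
      · intro _; rfl

theorem firstBad_some (inc : Bool) (l : List Int) (i0 i : Nat)
    (h : firstBadAux inc l i0 = some i) :
    i0 ≤ i ∧ i < l.length ∧ good_step inc (l.getD (i - 1) 0) (l.getD i 0) = false := by
  induction hn : l.length - i0 generalizing i0 with
  | zero =>
    rw [firstBadAux.eq_def, dif_neg (by omega)] at h
    exact absurd h (by simp)
  | succ n ih =>
    rw [firstBadAux.eq_def] at h
    by_cases hlt : i0 < l.length
    · rw [dif_pos hlt] at h
      cases hgs : good_step inc (l.getD (i0 - 1) 0) (l.getD i0 0) with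
      | false =>
        rw [if_neg (by rw [hgs]; simp)] at h
        obtain rfl : i0 = i := by injection h
        exact ⟨le_rfl, hlt, hgs⟩
      | true =>
        rw [if_pos hgs] at h
        obtain ⟨h1, h2, h3⟩ := ih (i0 + 1) h (by omega)
        exact ⟨by omega, h2, h3⟩
    · rw [dif_neg hlt] at h
      exact absurd h (by simp)

theorem good2Aux_iff (l : List Int) (i0 : Nat) :
    good2Aux l i0 = true ↔ ∃ j, i0 ≤ j ∧ j < l.length ∧ is_list_good (l.eraseIdx j) = true := by
  induction hn : l.length - i0 generalizing i0 with
  | zero =>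
    rw [good2Aux.eq_def, dif_neg (by omega)]
    simp only [Bool.false_eq_true, false_iff]
    rintro ⟨j, h1, h2, _⟩; omega
  | succ n ih =>
    rw [good2Aux.eq_def]
    by_cases hlt : i0 < l.length
    · rw [dif_pos hlt]
      simp only [slice_pair]
      cases hg : is_list_good (l.eraseIdx i0) with
      | true =>
        simp only [if_true]
        exact iff_of_true trivial ⟨i0, le_rfl, hlt, hg⟩
      | false =>
        rw [if_neg (by simp), ih (i0 + 1) (by omega)]  -- condition rewritten to false by cases
        constructor
        · rintro ⟨j, h1, h2, h3⟩; exact ⟨j, by omega, h2, h3⟩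
        · rintro ⟨j, h1, h2, h3⟩
          rcases Nat.eq_or_lt_of_le h1 with rfl | hlt2
          · exact absurd h3 (by simp [hg])
          · exact ⟨j, hlt2, h2, h3⟩
    · rw [dif_neg hlt]
      simp only [Bool.false_eq_true, false_iff]
      rintro ⟨j, h1, h2, _⟩; omega

theorem getD_eraseIdx_lt (l : List Int) (j k : Nat) (hj : j < l.length) (hk : k < j) :
    (l.eraseIdx j).getD k 0 = l.getD k 0 := by
  have hlen : (l.eraseIdx j).length = l.length - 1 := by rw [List.length_eraseIdx]; simp [hj]
  rw [List.getD_eq_getElem _ _ (by omega), List.getD_eq_getElem _ _ (by omega),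
    List.getElem_eraseIdx]
  simp [hk]

theorem getD_eraseIdx_ge (l : List Int) (j k : Nat) (hj : j < l.length) (hjk : j ≤ k)
    (hk : k + 1 < l.length) :
    (l.eraseIdx j).getD k 0 = l.getD (k + 1) 0 := by
  have hlen : (l.eraseIdx j).length = l.length - 1 := by rw [List.length_eraseIdx]; simp [hj]
  rw [List.getD_eq_getElem _ _ (by omega), List.getD_eq_getElem _ _ (by omega),
    List.getElem_eraseIdx]
  simp [Nat.not_lt.mpr hjk]

-- the crux: removing any index other than 0, 1, i-1, i cannot make the report safe
theorem candidate_lemma (l : List Int) (i j : Nat)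
    (hlen : 2 ≤ l.length)
    (hfb : firstBadAux (decide (l.getD 0 0 < l.getD 1 0)) l 1 = some i)
    (hj : j < l.length) (h0 : j ≠ 0) (h1 : j ≠ 1) (hi1 : j ≠ i - 1) (hii : j ≠ i) :
    safeB (l.eraseIdx j) = false := by
  obtain ⟨hi1, hilen, hbad⟩ := firstBad_some _ _ _ _ hfb
  have hj2 : 2 ≤ j := by omega
  have hmlen : (l.eraseIdx j).length = l.length - 1 := by rw [List.length_eraseIdx]; simp [hj]
  rw [safeB]
  have hm2 : ¬ (l.eraseIdx j).length < 2 := by omega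
  simp only [hm2, decide_false, Bool.false_or]
  have hinc : decide ((l.eraseIdx j).getD 0 0 < (l.eraseIdx j).getD 1 0)
      = decide (l.getD 0 0 < l.getD 1 0) := by
    rw [getD_eraseIdx_lt l j 0 hj (by omega), getD_eraseIdx_lt l j 1 hj (by omega)]
  rw [hinc]
  cases hfb2 : firstBadAux (decide (l.getD 0 0 < l.getD 1 0)) (l.eraseIdx j) 1 with
  | some k => simp
  | none =>
    exfalso
    rw [firstBad_none_iff] at hfb2
    by_cases hcase : i < j
    · -- the failing pair (i-1, i) is untouched
      have hx := hfb2 i hi1 (by omega)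
      rw [getD_eraseIdx_lt l j i hj hcase, getD_eraseIdx_lt l j (i - 1) hj (by omega)] at hx
      rw [hbad] at hx
      exact absurd hx (by simp)
    · -- j ≤ i - 2: the failing pair shifts one slot left
      have hji : j + 2 ≤ i := by omega
      have hx := hfb2 (i - 1) (by omega) (by omega)
      have e1 : i - 1 - 1 = i - 2 := by omega
      rw [e1, getD_eraseIdx_ge l j (i - 2) hj (by omega) (by omega),
        getD_eraseIdx_ge l j (i - 1) hj (by omega) (by omega)] at hx
      have e2 : i - 2 + 1 = i - 1 := by omega
      have e3 : i - 1 + 1 = i := by omega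
      rw [e2, e3, hbad] at hx
      exact absurd hx (by simp)

-- ===== VERDICT (by name: the statement is the Claim_ definition above) =====
theorem is_list_good2_spec : Claim_equal_is_list_good2 := by
  intro l _
  unfold Spec_is_list_good2 is_list_good2 is_list_good2_alt
  by_cases h2 : l.length < 2
  · have hg : is_list_good l = true := by
      rw [good_eq_safeB, safeB]; simp [h2]
    rw [hg]; simp [h2]
  · rw [good_eq_safeB, safeB]
    simp only [h2, decide_false, Bool.false_or]
    cases hfb : firstBadAux (decide (l.getD 0 0 < l.getD 1 0)) l 1 with
    | none => simp
    | some i =>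
      obtain ⟨hi1, hilen, hbad⟩ := firstBad_some _ _ _ _ hfb
      simp only [Option.isNone_some, Bool.false_eq_true, if_false]
      rw [Bool.eq_iff_iff, good2Aux_iff]
      simp only [List.any_eq_true, slice_pair, List.mem_cons, List.not_mem_nil, or_false]
      constructor
      · rintro ⟨j, -, hjlen, hgood⟩
        rw [good_eq_safeB] at hgood
        by_cases c0 : j = 0
        · exact ⟨j, by simp [c0], hgood⟩
        by_cases c1 : j = 1
        · exact ⟨j, by simp [c1], hgood⟩
        by_cases ci1 : j = i - 1
        · exact ⟨j, by simp [ci1], hgood⟩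
        by_cases ci : j = i
        · exact ⟨j, by simp [ci], hgood⟩
        exact absurd hgood (by simp [candidate_lemma l i j (by omega) hfb hjlen c0 c1 ci1 ci])
      · rintro ⟨j, hjmem, hsafe⟩
        refine ⟨j, Nat.zero_le _, ?_, by rw [good_eq_safeB]; exact hsafe⟩
        rcases hjmem with rfl | rfl | rfl | rfl <;> omega
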